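-- pv_equiv track=rewrite | github.com/shrenik007/big-data-spark | spark coding 2/Workspace/1_Spark_Core/3_RDD_Basic_Actions/p14_aggregate.py | combine_accum_of_nodes
-- ===== SOURCE A (Python) =====
-- import bisect
--
-- def combine_accum_of_nodes(accum1, accum2):
--     # 1. We create the output variable
--     res = ()
--
--     # 1.1. We output the dictionary
--     my_dict = accum1[0]
--
--     # 1.2. We output the number of words
--     num_words = accum1[1] + accum2[1]
--
--     # 2. We kept the dictionary of accum2
--     other_dict = accum2[0]
--
--     # 3. We traverse the content of such dictionary
--     for letter in other_dict:
--         # 3.1. If letter was not in the first dictionary, we create the entry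
--         if (letter not in my_dict):
--             my_dict[letter] = other_dict[letter]
--
--         # 3.2. If the letter was on the first dictionary
--         else:
--             # 3.2.1. We traverse the list of words
--             for word in other_dict[letter]:
--                 # 3.2.1.1. We find the index to add at
--                 index = bisect.bisect_left(my_dict[letter], word)
--
--                 # 3.2.1.2. If the word was not there
--                 if (index == len(my_dict[letter])) or (my_dict[letter][index] != word):
--                     # 3.2.1.2.1 We add the word to the list at that index
--                     my_dict[letter].insert(index, word)
--
--                 # 3.2.1.3. If the word was already there
--                 else:
--                     # 3.2.1.3.1. As we have counted the word, we decrease it now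
--                     num_words = num_words - 1
--
--     # 4. We assign res
--     res = (my_dict, num_words)
--
--     # 5. We return res
--     return res
-- ===== SOURCE B (Python) =====
-- def _chunk_get(chunks, i):
--     for c in chunks:
--         if i < len(c):
--             return c[i]
--         i -= len(c)
--     return None
--
-- def _chunk_insert(chunks, i, w, ch):
--     for k, c in enumerate(chunks):
--         if i <= len(c):
--             c.insert(i, w)
--             if len(c) > 2 * ch:
--                 chunks[k:k + 1] = [c[:ch], c[ch:]]
--             return
--         i -= len(c)
--     chunks.append([w])
--
-- def combine_accum_of_nodes(accum1, accum2):
--     # Same bisect_left semantics as A, but the per-letter list is kept as a list of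
--     # bounded chunks, so an insertion shifts one chunk instead of the whole list.
--     # Like A, mutates accum1's dict in place; equivalence is about the return value.
--     my_dict = accum1[0]
--     num_words = accum1[1] + accum2[1]
--     other_dict = accum2[0]
--     CH = 64
--     for letter in other_dict:
--         words = other_dict[letter]
--         if letter not in my_dict:
--             my_dict[letter] = words
--         else:
--             cur = my_dict[letter]
--             chunks = [cur[i:i + CH] for i in range(0, len(cur), CH)]
--             total = len(cur)
--             for w in words:
--                 lo, hi = 0, total
--                 while lo < hi:
--                     mid = (lo + hi) // 2
--                     if _chunk_get(chunks, mid) < w: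
--                         lo = mid + 1
--                     else:
--                         hi = mid
--                 if lo == total or _chunk_get(chunks, lo) != w:
--                     _chunk_insert(chunks, lo, w, CH)
--                     total += 1
--                 else:
--                     num_words -= 1
--             merged = []
--             for c in chunks:
--                 merged.extend(c)
--             my_dict[letter] = merged
--     return (my_dict, num_words)
-- ===== Notes on version B (the rewrite author's own statement) =====
-- stated objective: alternative
-- what changed: A keeps each letter's word list as one flat Python list, so every bisect-insert shifts the whole tail; B stores the evolving list as a list of bounded chunks (split at 64/128 elements) with positional lookup for the same bisect_left search, so an insertion shifts at most one chunk.
import Mathlib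
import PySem

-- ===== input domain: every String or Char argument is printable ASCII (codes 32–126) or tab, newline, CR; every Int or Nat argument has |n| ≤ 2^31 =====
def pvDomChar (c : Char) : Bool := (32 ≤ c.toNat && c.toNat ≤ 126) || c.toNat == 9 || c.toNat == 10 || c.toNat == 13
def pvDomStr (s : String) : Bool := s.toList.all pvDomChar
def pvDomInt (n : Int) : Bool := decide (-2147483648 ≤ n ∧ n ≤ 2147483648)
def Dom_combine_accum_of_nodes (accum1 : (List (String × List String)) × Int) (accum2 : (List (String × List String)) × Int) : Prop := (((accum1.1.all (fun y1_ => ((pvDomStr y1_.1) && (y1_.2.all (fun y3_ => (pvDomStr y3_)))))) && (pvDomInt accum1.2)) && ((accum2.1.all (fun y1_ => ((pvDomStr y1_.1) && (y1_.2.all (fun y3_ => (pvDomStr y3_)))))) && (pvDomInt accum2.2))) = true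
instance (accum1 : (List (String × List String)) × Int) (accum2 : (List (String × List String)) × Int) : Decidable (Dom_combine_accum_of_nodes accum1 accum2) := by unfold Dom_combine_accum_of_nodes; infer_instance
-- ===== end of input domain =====

-- B keeps A's exact bisect_left semantics but stores each letter's evolving word list
-- as a list of bounded chunks, so an insertion shifts one chunk instead of the whole
-- list; like A, the Python B mutates accum1's dict in place — the equivalence is
-- about the return value.

-- ===== PORT A =====
-- inner loop body of A (step 3.2.1): bisect_left, then insert or decrement
def aWordBody (letter : String) (st : PySem.Dict String (List String) × Int) (word : String) :
    PySem.Dict String (List String) × Int :=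
  let cur := st.1.getD letter []
  let index := PySem.List.bisectLeft cur word
  if index = cur.length ∨ PySem.List.pyGetD cur (index : Int) "" ≠ word then
    (st.1.insert letter (PySem.List.insert cur (index : Int) word), st.2)
  else
    (st.1, st.2 - 1)

-- body of A's "for letter in other_dict" loop (steps 3.1 / 3.2)
def aEntryBody (otherDict : PySem.Dict String (List String))
    (st : PySem.Dict String (List String) × Int) (kv : String × List String) :
    PySem.Dict String (List String) × Int :=
  let letter := kv.1
  if st.1.contains letter = false then
    (st.1.insert letter (otherDict.getD letter []), st.2)
  else
    (otherDict.getD letter []).foldl (aWordBody letter) st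

def combine_accum_of_nodes (accum1 : (List (String × List String)) × Int) (accum2 : (List (String × List String)) × Int) : (List (String × List String)) × Int :=
  let myDict : PySem.Dict String (List String) := ⟨accum1.1⟩
  let numWords : Int := accum1.2 + accum2.2
  let otherDict : PySem.Dict String (List String) := ⟨accum2.1⟩
  let res := otherDict.items.foldl (aEntryBody otherDict) (myDict, numWords)
  (res.1.items, res.2)

-- ===== PORT B =====
-- _chunk_get: walk the chunks to index position i (None = past the end)
def chunkGet : List (List String) → Nat → Option String
  | [], _ => none
  | c :: cs, i => if i < c.length then some (c.getD i "") else chunkGet cs (i - c.length)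

-- _chunk_insert: walk to the owning chunk, list.insert there, split an oversized chunk
def chunkInsert : List (List String) → Nat → String → List (List String)
  | [], _, w => [[w]]
  | c :: cs, i, w =>
    if i ≤ c.length then
      (let c' := PySem.List.insert c (i : Int) w
       if 2 * 64 < c'.length then [c'.take 64, c'.drop 64] else [c']) ++ cs
    else
      c :: chunkInsert cs (i - c.length) w

-- the `while lo < hi` bisect loop of Source B over the chunked sequence (fuel = hi - lo,
-- as strictly decreasing bound of the while loop)
def chunkBisectLoop (cs : List (List String)) (w : String) : Nat → Nat → Nat → Nat
  | 0, lo, _ => lo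
  | fuel + 1, lo, hi =>
    if lo < hi then
      match chunkGet cs ((lo + hi) / 2) with
      | some y =>
        if y < w then chunkBisectLoop cs w fuel ((lo + hi) / 2 + 1) hi
        else chunkBisectLoop cs w fuel lo ((lo + hi) / 2)
      | none => lo
    else lo

-- the initial chunking [cur[i:i+CH] for i in range(0, len(cur), CH)]
def chunksOf (l : List String) : List (List String) :=
  if l = [] then [] else l.take 64 :: chunksOf (l.drop 64)
termination_by l.length
decreasing_by
  rename_i h
  simp only [List.length_drop]
  cases l with
  | nil => exact absurd rfl h
  | cons x xs => simp

-- body of B's "for w in words" loop: state (chunks, total, num_words)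
def bWordStep (st : List (List String) × Nat × Int) (w : String) :
    List (List String) × Nat × Int :=
  let lo := chunkBisectLoop st.1 w st.2.1 0 st.2.1
  if lo = st.2.1 ∨ chunkGet st.1 lo ≠ some w then
    (chunkInsert st.1 lo w, st.2.1 + 1, st.2.2)
  else
    (st.1, st.2.1, st.2.2 - 1)

-- per-letter merge of B (chunk, fold the words, re-flatten)
def bLetter (a : List String) (words : List String) (n : Int) : List String × Int :=
  let r := words.foldl bWordStep (chunksOf a, a.length, n)
  (r.1.flatten, r.2.2)

-- body of B's "for letter in other_dict" loop
def bEntryBody (otherDict : PySem.Dict String (List String))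
    (st : PySem.Dict String (List String) × Int) (kv : String × List String) :
    PySem.Dict String (List String) × Int :=
  let letter := kv.1
  let words := otherDict.getD letter []
  match st.1.get? letter with
  | none => (st.1.insert letter words, st.2)
  | some a =>
    let r := bLetter a words st.2
    (st.1.insert letter r.1, r.2)

def combine_accum_of_nodes_alt (accum1 : (List (String × List String)) × Int) (accum2 : (List (String × List String)) × Int) : (List (String × List String)) × Int :=
  let otherDict : PySem.Dict String (List String) := ⟨accum2.1⟩
  let res := otherDict.items.foldl (bEntryBody otherDict) (⟨accum1.1⟩, accum1.2 + accum2.2)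
  (res.1.items, res.2)

-- ===== PRECONDITION & SPEC =====
-- Pre_ excludes only association lists whose accum1 keys repeat, which no Python dict
-- can produce (a Lean-representation artifact of the dict-as-list convention).
def Pre_combine_accum_of_nodes (accum1 : (List (String × List String)) × Int) (accum2 : (List (String × List String)) × Int) : Prop :=
  (accum1.1.map Prod.fst).Nodup
instance (accum1 : (List (String × List String)) × Int) (accum2 : (List (String × List String)) × Int) : Decidable (Pre_combine_accum_of_nodes accum1 accum2) := by unfold Pre_combine_accum_of_nodes; infer_instance

def pvWitness_combine_accum_of_nodes : ((List (String × List String)) × Int) × ((List (String × List String)) × Int) :=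
  (([("a", ["x", "y"])], 2), ([("a", ["x", "z"]), ("b", ["q"])], 3))

def Spec_combine_accum_of_nodes (accum1 : (List (String × List String)) × Int) (accum2 : (List (String × List String)) × Int) (out : (List (String × List String)) × Int) : Prop := out = combine_accum_of_nodes_alt accum1 accum2
instance (accum1 : (List (String × List String)) × Int) (accum2 : (List (String × List String)) × Int) (out : (List (String × List String)) × Int) : Decidable (Spec_combine_accum_of_nodes accum1 accum2 out) := by unfold Spec_combine_accum_of_nodes; infer_instance

-- ===== CLAIM (what is proved, stated in full; the proofs are below) =====
def Claim_equal_combine_accum_of_nodes : Prop := ∀ (accum1 : (List (String × List String)) × Int) (accum2 : (List (String × List String)) × Int), Dom_combine_accum_of_nodes accum1 accum2 → Pre_combine_accum_of_nodes accum1 accum2 → Spec_combine_accum_of_nodes accum1 accum2 (combine_accum_of_nodes accum1 accum2)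

-- ===== LEMMAS AND PROOFS =====

-- A's per-word step on the plain list (what aWordBody does to the stored list/count)
def listStep (st : List String × Int) (w : String) : List String × Int :=
  let cur := st.1
  let index := PySem.List.bisectLeft cur w
  if index = cur.length ∨ PySem.List.pyGetD cur (index : Int) "" ≠ w then
    (PySem.List.insert cur (index : Int) w, st.2)
  else
    (cur, st.2 - 1)

-- ===== chunk structure vs plain list =====
lemma pv_chunkGet_eq : ∀ (cs : List (List String)) (i : Nat),
    chunkGet cs i = cs.flatten[i]? := by
  intro cs
  induction cs with
  | nil => intro i; simp [chunkGet]
  | cons c rest ih =>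
    intro i
    unfold chunkGet
    by_cases hi : i < c.length
    · rw [if_pos hi]
      rw [List.flatten_cons, List.getElem?_append_left hi]
      rw [List.getElem?_eq_getElem hi, List.getD_eq_getElem _ _ hi]
    · rw [if_neg hi, ih]
      rw [List.flatten_cons, List.getElem?_append_right (by omega)]

lemma pv_chunkLoop_eq (w : String) (cs : List (List String)) :
    ∀ (fuel lo hi : Nat),
      chunkBisectLoop cs w fuel lo hi = PySem.List.bisectLeftLoop cs.flatten w fuel lo hi := by
  intro fuel
  induction fuel with
  | zero =>
    intro lo hi
    rw [chunkBisectLoop, PySem.List.bisectLeftLoop.eq_def]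
  | succ f ih =>
    intro lo hi
    rw [chunkBisectLoop, PySem.List.bisectLeftLoop.eq_def]
    simp only [pv_chunkGet_eq]
    by_cases hlh : lo < hi
    · rw [if_pos hlh, if_pos hlh]
      cases hg : cs.flatten[(lo + hi) / 2]? with
      | none => rfl
      | some y =>
        show (if y < w then chunkBisectLoop cs w f ((lo + hi) / 2 + 1) hi
              else chunkBisectLoop cs w f lo ((lo + hi) / 2))
            = (if y < w then PySem.List.bisectLeftLoop cs.flatten w f ((lo + hi) / 2 + 1) hi
              else PySem.List.bisectLeftLoop cs.flatten w f lo ((lo + hi) / 2))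
        by_cases hy : y < w
        · rw [if_pos hy, if_pos hy, ih]
        · rw [if_neg hy, if_neg hy, ih]
    · rw [if_neg hlh, if_neg hlh]

lemma pv_bisectLoop_le (xs : List String) (w : String) :
    ∀ (fuel lo hi : Nat), lo ≤ hi → PySem.List.bisectLeftLoop xs w fuel lo hi ≤ hi := by
  intro fuel
  induction fuel with
  | zero => intro lo hi h; rw [PySem.List.bisectLeftLoop.eq_def]; exact h
  | succ f ih =>
    intro lo hi h
    rw [PySem.List.bisectLeftLoop.eq_def]
    simp only
    by_cases hlh : lo < hi
    · rw [if_pos hlh]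
      cases hg : xs[(lo + hi) / 2]? with
      | none => exact h
      | some y =>
        show (if y < w then PySem.List.bisectLeftLoop xs w f ((lo + hi) / 2 + 1) hi
              else PySem.List.bisectLeftLoop xs w f lo ((lo + hi) / 2)) ≤ hi
        by_cases hy : y < w
        · rw [if_pos hy]; exact ih _ _ (by omega)
        · rw [if_neg hy]; exact le_trans (ih _ _ (by omega)) (by omega)
    · rw [if_neg hlh]; exact h

lemma pv_bisectLeft_le (xs : List String) (w : String) :
    PySem.List.bisectLeft xs w ≤ xs.length := by
  unfold PySem.List.bisectLeft
  exact pv_bisectLoop_le xs w xs.length 0 xs.length (Nat.zero_le _)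

lemma pv_split_flatten (x : List String) (rest : List (List String)) :
    ((if 2 * 64 < x.length then [x.take 64, x.drop 64] else [x]) ++ rest).flatten
      = x ++ rest.flatten := by
  split
  · simp only [List.cons_append, List.nil_append, List.flatten_cons]
    rw [← List.append_assoc, List.take_append_drop]
  · simp

lemma pv_chunkInsert_flatten : ∀ (cs : List (List String)) (i : Nat) (w : String),
    i ≤ cs.flatten.length →
    (chunkInsert cs i w).flatten = PySem.List.insert cs.flatten (i : Int) w := by
  intro cs
  induction cs with
  | nil =>
    intro i w hi
    simp only [List.flatten_nil, List.length_nil, Nat.le_zero] at hi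
    subst hi
    simp only [List.flatten_nil]
    rw [PySem.List.insert_natCast [] 0 w (by simp)]
    simp [chunkInsert]
  | cons c rest ih =>
    intro i w hi
    unfold chunkInsert
    rw [List.flatten_cons] at hi ⊢
    by_cases hic : i ≤ c.length
    · rw [if_pos hic]
      show ((if 2 * 64 < (PySem.List.insert c (i : Int) w).length then
              [(PySem.List.insert c (i : Int) w).take 64, (PySem.List.insert c (i : Int) w).drop 64]
            else [PySem.List.insert c (i : Int) w]) ++ rest).flatten
          = PySem.List.insert (c ++ rest.flatten) (i : Int) w
      rw [pv_split_flatten]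
      rw [PySem.List.insert_natCast c i w hic,
          PySem.List.insert_natCast (c ++ rest.flatten) i w (by simp; omega)]
      rw [List.take_append, List.drop_append]
      have h1 : i - c.length = 0 := by omega
      simp [h1]
    · rw [if_neg hic]
      rw [List.flatten_cons, ih (i - c.length) w (by simp at hi ⊢; omega)]
      rw [PySem.List.insert_natCast rest.flatten (i - c.length) w (by simp at hi ⊢; omega),
          PySem.List.insert_natCast (c ++ rest.flatten) i w (by simp at hi ⊢; omega)]
      rw [List.take_append, List.drop_append]
      have h1 : c.take i = c := List.take_of_length_le (by omega)
      have h2 : c.drop i = [] := List.drop_of_length_le (by omega)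
      simp [h1, h2]

lemma pv_chunksOf_flatten_aux : ∀ (n : Nat) (l : List String), l.length ≤ n →
    (chunksOf l).flatten = l := by
  intro n
  induction n with
  | zero =>
    intro l hl
    cases l with
    | nil => rw [chunksOf]; simp
    | cons x xs => simp at hl
  | succ m ih =>
    intro l hl
    rw [chunksOf]
    split
    · rename_i h; rw [h]; rfl
    · rename_i h
      have hpos : 0 < l.length := List.length_pos_iff.mpr h
      rw [List.flatten_cons, ih (l.drop 64) (by simp only [List.length_drop]; omega),
          List.take_append_drop]

lemma pv_chunksOf_flatten (l : List String) : (chunksOf l).flatten = l :=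
  pv_chunksOf_flatten_aux l.length l le_rfl

-- ===== one word: B's chunked step tracks A's list step =====
lemma pv_bWordStep_eq (chunks : List (List String)) (total : Nat) (n : Int) (w : String)
    (hlen : chunks.flatten.length = total) :
    (bWordStep (chunks, total, n) w).1.flatten = (listStep (chunks.flatten, n) w).1 ∧
    (bWordStep (chunks, total, n) w).2.1 = (listStep (chunks.flatten, n) w).1.length ∧
    (bWordStep (chunks, total, n) w).2.2 = (listStep (chunks.flatten, n) w).2 := by
  unfold bWordStep listStep
  simp only
  have hloop : chunkBisectLoop chunks w total 0 total
      = PySem.List.bisectLeft chunks.flatten w := by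
    rw [pv_chunkLoop_eq]
    unfold PySem.List.bisectLeft
    rw [hlen]
  set idx := PySem.List.bisectLeft chunks.flatten w with hidx
  have hle : idx ≤ chunks.flatten.length := pv_bisectLeft_le _ _
  have hcond : (chunkBisectLoop chunks w total 0 total = total
        ∨ chunkGet chunks (chunkBisectLoop chunks w total 0 total) ≠ some w)
      ↔ (idx = chunks.flatten.length
        ∨ PySem.List.pyGetD chunks.flatten (idx : Int) "" ≠ w) := by
    rw [hloop, ← hlen, pv_chunkGet_eq]
    by_cases hend : idx = chunks.flatten.length
    · simp [hend]
    · have hlt : idx < chunks.flatten.length := by omega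
      rw [List.getElem?_eq_getElem hlt]
      rw [PySem.List.pyGetD_natCast, List.getD_eq_getElem _ _ hlt]
      simp
  by_cases hc : idx = chunks.flatten.length
      ∨ PySem.List.pyGetD chunks.flatten (idx : Int) "" ≠ w
  · rw [if_pos (hcond.mpr hc), if_pos hc]
    refine ⟨?_, ?_, rfl⟩
    · rw [hloop, pv_chunkInsert_flatten chunks idx w hle]
    · rw [PySem.List.insert_natCast chunks.flatten idx w hle]
      simp only [List.length_append, List.length_cons, List.length_take, List.length_drop]
      omega
  · rw [if_neg (fun h => hc (hcond.mp h)), if_neg hc]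
    exact ⟨rfl, hlen.symm, rfl⟩

lemma pv_bFold : ∀ (words : List String) (chunks : List (List String)) (total : Nat) (n : Int),
    chunks.flatten.length = total →
    (words.foldl bWordStep (chunks, total, n)).1.flatten
        = (words.foldl listStep (chunks.flatten, n)).1 ∧
    (words.foldl bWordStep (chunks, total, n)).2.2
        = (words.foldl listStep (chunks.flatten, n)).2 := by
  intro words
  induction words with
  | nil => intro chunks total n h; simp
  | cons w ws ih =>
    intro chunks total n h
    rw [List.foldl_cons, List.foldl_cons]
    obtain ⟨h1, h2, h3⟩ := pv_bWordStep_eq chunks total n w h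
    obtain ⟨g1, g2⟩ := ih (bWordStep (chunks, total, n) w).1
      (bWordStep (chunks, total, n) w).2.1 (bWordStep (chunks, total, n) w).2.2
      (by rw [h1, h2])
    rw [← Prod.mk.eta (p := bWordStep (chunks, total, n) w),
        ← Prod.mk.eta (p := (bWordStep (chunks, total, n) w).2)] 
    rw [← Prod.mk.eta (p := listStep (chunks.flatten, n) w)] 
    constructor
    · rw [g1, h1, h3]
    · rw [g2, h1, h3]

-- ===== Dict helper lemmas =====
lemma pv_get?_of_mem {ν : Type} (d : PySem.Dict String ν) (k : String) (v : ν)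
    (hnd : d.keys.Nodup) (hmem : (k, v) ∈ d.items) : d.get? k = some v := by
  obtain ⟨items⟩ := d
  unfold PySem.Dict.get?
  simp only [PySem.Dict.keys] at hnd
  simp only at hnd hmem ⊢
  induction items with
  | nil => simp at hmem
  | cons p rest ih =>
    simp only [List.map_cons, List.nodup_cons] at hnd
    rcases List.mem_cons.mp hmem with rfl | hmem'
    · simp
    · have hne : ¬ (p.1 == k) = true := by
        simp only [beq_iff_eq]
        intro hk
        exact hnd.1 (by simpa [← hk] using List.mem_map_of_mem (f := Prod.fst) hmem')
      rw [show List.find? (fun q => q.1 == k) (p :: rest) = List.find? (fun q => q.1 == k) rest from by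
        simp [hne]]
      exact ih hnd.2 hmem'

lemma pv_get?_isSome {ν : Type} (d : PySem.Dict String ν) (k : String)
    (h : d.contains k = true) : ∃ a, d.get? k = some a := by
  cases hg : d.get? k with
  | none =>
    rw [PySem.Dict.get?_eq_none_iff_contains] at hg
    rw [h] at hg; cases hg
  | some a => exact ⟨a, rfl⟩

lemma pv_insert_self {ν : Type} (d : PySem.Dict String ν) (k : String) (v : ν)
    (hnd : d.keys.Nodup) (h : d.get? k = some v) : d.insert k v = d := by
  have hc : d.contains k = true := by
    by_contra hc
    have := (PySem.Dict.get?_eq_none_iff_contains d k).mpr (by simpa using hc)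
    rw [h] at this; cases this
  apply PySem.Dict.ext
  rw [PySem.Dict.items_insert_of_contains d v hc]
  conv_rhs => rw [← List.map_id d.items]
  apply List.map_congr_left
  intro p hp
  by_cases hk : (p.1 == k) = true
  · have hk' : p.1 = k := by simpa using hk
    have hget : d.get? k = some p.2 := by
      rw [← hk']
      exact pv_get?_of_mem d p.1 p.2 hnd (by simpa using hp)
    have hv : p.2 = v := by rw [hget] at h; injection h
    rw [if_pos hk]
    simp only [id_eq]
    exact Prod.ext_iff.mpr ⟨hk'.symm, hv.symm⟩
  · rw [if_neg hk]; rfl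

-- ===== A's inner loop = listStep fold over the stored list =====
lemma pv_aWordBody_eq (letter : String) (d : PySem.Dict String (List String)) (n : Int)
    (a : List String) (w : String) (hnd : d.keys.Nodup) (hget : d.get? letter = some a) :
    aWordBody letter (d, n) w
      = (d.insert letter (listStep (a, n) w).1, (listStep (a, n) w).2) := by
  have hcur : d.getD letter [] = a := by unfold PySem.Dict.getD; rw [hget]; rfl
  unfold aWordBody listStep
  simp only [hcur]
  by_cases hc : PySem.List.bisectLeft a w = a.length
      ∨ PySem.List.pyGetD a ((PySem.List.bisectLeft a w : Nat) : Int) "" ≠ w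
  · rw [if_pos hc, if_pos hc]
  · rw [if_neg hc, if_neg hc]
    rw [pv_insert_self d letter a hnd hget]

lemma pv_aFold (letter : String) : ∀ (ws : List String) (d : PySem.Dict String (List String))
    (n : Int) (a : List String), d.keys.Nodup → d.get? letter = some a →
    ws.foldl (aWordBody letter) (d, n)
      = (d.insert letter (ws.foldl listStep (a, n)).1, (ws.foldl listStep (a, n)).2) := by
  intro ws
  induction ws with
  | nil =>
    intro d n a hnd hget
    simp only [List.foldl_nil]
    rw [pv_insert_self d letter a hnd hget]
  | cons w ws ih =>
    intro d n a hnd hget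
    rw [List.foldl_cons, List.foldl_cons]
    rw [pv_aWordBody_eq letter d n a w hnd hget]
    rw [← Prod.mk.eta (p := listStep (a, n) w)]
    rw [ih (d.insert letter (listStep (a, n) w).1) (listStep (a, n) w).2 (listStep (a, n) w).1
          (PySem.Dict.nodup_keys_insert d letter _ hnd)
          (PySem.Dict.get?_insert_self d letter _)]
    rw [PySem.Dict.insert_insert_self]

-- ===== top-level =====
lemma pv_topFold (od : PySem.Dict String (List String)) :
    ∀ (l : List (String × List String)) (d : PySem.Dict String (List String)) (n : Int),
      d.keys.Nodup →
      l.foldl (aEntryBody od) (d, n) = l.foldl (bEntryBody od) (d, n) := by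
  intro l
  induction l with
  | nil => intro d n _; rfl
  | cons kv l ih =>
    intro d n hnd
    rw [List.foldl_cons, List.foldl_cons]
    by_cases hc : d.contains kv.1 = false
    · have hg : d.get? kv.1 = none := (PySem.Dict.get?_eq_none_iff_contains d kv.1).mpr hc
      have hA : aEntryBody od (d, n) kv = (d.insert kv.1 (od.getD kv.1 []), n) := by
        unfold aEntryBody; rw [if_pos hc]
      have hB : bEntryBody od (d, n) kv = (d.insert kv.1 (od.getD kv.1 []), n) := by
        unfold bEntryBody
        simp only [hg]
      rw [hA, hB]
      exact ih _ _ (PySem.Dict.nodup_keys_insert d kv.1 _ hnd)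
    · have hc' : d.contains kv.1 = true := by simpa using hc
      obtain ⟨a, hg⟩ := pv_get?_isSome d kv.1 hc'
      have hA : aEntryBody od (d, n) kv
          = (d.insert kv.1 ((od.getD kv.1 []).foldl listStep (a, n)).1,
             ((od.getD kv.1 []).foldl listStep (a, n)).2) := by
        unfold aEntryBody
        rw [if_neg (by simp [hc'])]
        exact pv_aFold kv.1 (od.getD kv.1 []) d n a hnd hg
      have hbf := pv_bFold (od.getD kv.1 []) (chunksOf a) a.length n
        (by rw [pv_chunksOf_flatten])
      rw [pv_chunksOf_flatten] at hbf
      have hB : bEntryBody od (d, n) kv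
          = (d.insert kv.1 ((od.getD kv.1 []).foldl listStep (a, n)).1,
             ((od.getD kv.1 []).foldl listStep (a, n)).2) := by
        unfold bEntryBody
        simp only [hg]
        unfold bLetter
        simp only
        rw [hbf.1, hbf.2]
      rw [hA, hB]
      exact ih _ _ (PySem.Dict.nodup_keys_insert d kv.1 _ hnd)

-- ===== VERDICT (by name: the statement is the Claim_ definition above) =====
theorem combine_accum_of_nodes_spec : Claim_equal_combine_accum_of_nodes := by
  intro accum1 accum2 _ hpre
  unfold Spec_combine_accum_of_nodes
  unfold combine_accum_of_nodes combine_accum_of_nodes_alt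
  simp only
  rw [pv_topFold ⟨accum2.1⟩ accum2.1 ⟨accum1.1⟩ (accum1.2 + accum2.2)
        (by simpa [PySem.Dict.keys] using hpre)]
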